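-- pv_equiv track=rewrite | github.com/eno314/BrainTrainingPuzzles | src/part3/q02/baseball_point_pattern.py | calc_second_pattern_count
-- ===== SOURCE A (Python) =====
-- def calc_second_pattern_count(first_point: int, second_point: int) -> int:
--     """
--     後攻の得点パターンを算出する
--     先攻が勝った場合は、先攻と同じ算出方法になる
--     >>> calc_second_pattern_count(3, 2)
--     45
--
--     後攻が勝った場合
--     >>> calc_second_pattern_count(1, 2)
--     37
--     """
--     is_first_win = first_point > second_point
--     if is_first_win:
--         return calc_pattern_count(second_point, 9)
--     else:
--         # 8回までしか攻撃せずにpoint点取った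
--         without_9 = calc_pattern_count(second_point, 8)
--         # 9回まで攻撃した場合、先攻が9回に何点取ったかでパターン数が決まる
--         with_9 = sum([
--             calc_pattern_count(i, 8) for i in range(first_point)
--         ])
--         return without_9 + with_9
--
-- def calc_pattern_count(point: int, inning: int) -> int:
--     # 残り回数が1回になれば1通り
--     if inning == 1:
--         return 1
--     counter = 0
--     for i in range(point + 1):
--         # 1イニングでi点取った場合を計算する
--         counter += calc_pattern_count(point - i, inning - 1)
--     return counter
-- ===== SOURCE B (Python) =====
-- def _comb(n, k):
--     # binomial coefficient C(n, k); 0 when n < 0 or n < k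
--     if n < 0 or n < k:
--         return 0
--     r = 1
--     for j in range(1, k + 1):
--         r = r * (n - k + j) // j
--     return r
--
--
-- def calc_second_pattern_count(first_point, second_point):
--     if first_point > second_point:
--         # compositions of second_point into 9 innings: C(sp+8, 8)
--         return _comb(second_point + 8, 8)
--     # 8 innings: C(sp+7, 7); plus hockey-stick sum over first 9th-inning scores: C(fp+7, 8)
--     return _comb(second_point + 7, 7) + _comb(first_point + 7, 8)
-- ===== Notes on version B (the rewrite author's own statement) =====
-- stated objective: faster
-- what changed: replaced the exponential recursive enumeration of inning-by-inning score compositions with closed-form binomial coefficients (stars-and-bars C(p+k-1,k-1) and the hockey-stick identity for the 9th-inning sum) computed by a fixed 8-step exact-division product loop; intended as faster: measured B 1174x faster at the largest size A finished (A timed out on larger inputs, so a timing run could not fully confirm)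
import Mathlib
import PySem

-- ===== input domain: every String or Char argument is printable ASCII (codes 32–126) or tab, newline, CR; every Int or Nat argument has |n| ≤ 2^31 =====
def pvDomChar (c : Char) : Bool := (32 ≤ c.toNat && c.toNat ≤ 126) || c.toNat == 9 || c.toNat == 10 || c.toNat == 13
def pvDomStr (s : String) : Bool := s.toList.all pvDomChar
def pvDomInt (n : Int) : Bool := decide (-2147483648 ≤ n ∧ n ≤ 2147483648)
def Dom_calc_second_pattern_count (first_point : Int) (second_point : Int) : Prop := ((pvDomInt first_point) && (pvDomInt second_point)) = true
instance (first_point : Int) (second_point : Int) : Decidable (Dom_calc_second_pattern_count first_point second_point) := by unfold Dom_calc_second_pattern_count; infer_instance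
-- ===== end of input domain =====

-- B replaces A's exponential recursive enumeration of compositions by closed-form binomial
-- coefficients (stars-and-bars + hockey-stick); intended as faster (measured 1174x at the
-- largest size A finished; A timed out beyond that, so the probe could not fully confirm).

-- ===== PORT A =====
-- helper calc_pattern_count; Python only ever calls it with inning ≥ 1 (9 and 8, decremented
-- down to 1), so the inning parameter is the Nat depth; the 0 case is unreachable.
def calcPatternCount : Int → Nat → Int
  | _, 0 => 0
  | _, 1 => 1
  | point, (n+2) =>
      (PySem.List.pyRange 0 (point + 1) 1).foldl
        (fun counter i => counter + calcPatternCount (point - i) (n + 1)) 0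

def calc_second_pattern_count (first_point : Int) (second_point : Int) : Int :=
  if first_point > second_point then
    calcPatternCount second_point 9
  else
    let without_9 := calcPatternCount second_point 8
    let with_9 := ((PySem.List.pyRange 0 first_point 1).map
        (fun i => calcPatternCount i 8)).sum
    without_9 + with_9

-- ===== PORT B =====
-- _comb from Source B: binomial coefficient by an exact-division product loop
def combB (n : Int) (k : Int) : Int :=
  if n < 0 ∨ n < k then 0
  else
    (PySem.List.pyRange 1 (k + 1) 1).foldl
      (fun r j => PySem.Int.floordiv (r * (n - k + j)) j) 1

def calc_second_pattern_count_alt (first_point : Int) (second_point : Int) : Int :=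
  if first_point > second_point then
    combB (second_point + 8) 8
  else
    combB (second_point + 7) 7 + combB (first_point + 7) 8

-- ===== PRECONDITION & SPEC =====
def Spec_calc_second_pattern_count (first_point : Int) (second_point : Int) (out : Int) : Prop := out = calc_second_pattern_count_alt first_point second_point
instance (first_point : Int) (second_point : Int) (out : Int) : Decidable (Spec_calc_second_pattern_count first_point second_point out) := by unfold Spec_calc_second_pattern_count; infer_instance

-- ===== CLAIM (what is proved, stated in full; the proofs are below) =====
def Claim_equal_calc_second_pattern_count : Prop := ∀ (first_point : Int) (second_point : Int), Dom_calc_second_pattern_count first_point second_point → Spec_calc_second_pattern_count first_point second_point (calc_second_pattern_count first_point second_point)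

-- ===== LEMMAS AND PROOFS =====

-- hockey stick, "N-k" form: ∑_{k=0}^{N} C(N-k+m, m) = C(N+m+1, m+1)
theorem pv_hockey1 (m : Nat) : ∀ N : Nat,
    ((List.range (N + 1)).map (fun k => (N - k + m).choose m)).sum
      = (N + m + 1).choose (m + 1) := by
  intro N
  induction N with
  | zero => simp
  | succ N ih =>
      rw [List.range_succ_eq_map]
      simp only [List.map_cons, List.map_map, List.sum_cons]
      have h2 : ((List.range (N + 1)).map
          ((fun k => (N + 1 - k + m).choose m) ∘ (fun i => i + 1))).sum
          = ((List.range (N + 1)).map (fun k => (N - k + m).choose m)).sum := by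
        apply congrArg
        apply List.map_congr_left
        intro k hk
        simp only [Function.comp]
        congr 2
        omega
      rw [h2, ih]
      rw [show N + 1 - 0 + m = N + m + 1 from by omega,
        show N + 1 + m + 1 = (N + m + 1) + 1 from by omega,
        Nat.choose_succ_succ (N + m + 1) m]

-- hockey stick, increasing form: ∑_{k=0}^{N-1} C(k+m, m) = C(N+m, m+1)
theorem pv_hockey2 (m : Nat) : ∀ N : Nat,
    ((List.range N).map (fun k => (k + m).choose m)).sum = (N + m).choose (m + 1) := by
  intro N
  induction N with
  | zero => simp
  | succ N ih =>
      rw [List.range_succ, List.map_append, List.sum_append, ih]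
      simp only [List.map_cons, List.map_nil, List.sum_cons, List.sum_nil]
      rw [show N + 1 + m = (N + m) + 1 from by omega, Nat.choose_succ_succ (N + m) m]
      simp only [Nat.succ_eq_add_one]
      omega

-- A's helper equals the stars-and-bars closed form (selected cases; 0 case unreachable)
theorem pv_calcPatternCount_eq (m : Nat) : ∀ p : Int,
    calcPatternCount p (m + 1)
      = if 0 ≤ p then ((p.toNat + m).choose m : Int) else (if m = 0 then 1 else 0) := by
  induction m with
  | zero =>
      intro p
      simp [calcPatternCount]
  | succ m ih =>
      intro p
      show (PySem.List.pyRange 0 (p + 1) 1).foldl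
          (fun counter i => counter + calcPatternCount (p - i) (m + 1)) 0 = _
      by_cases hp : 0 ≤ p
      · rw [PySem.List.foldl_add]
        rw [PySem.List.pyRange_one, List.map_map]
        have hmap : (List.range ((p + 1 - 0).toNat)).map
            ((fun i => calcPatternCount (p - i) (m + 1)) ∘ (fun k : Nat => (0 : Int) + k))
            = (List.range (p.toNat + 1)).map
                (fun k => ((p.toNat - k + m).choose m : Int)) := by
          have hlen : (p + 1 - 0).toNat = p.toNat + 1 := by omega
          rw [hlen]
          apply List.map_congr_left
          intro k hk
          have hk' : k ≤ p.toNat := by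
            have := List.mem_range.mp hk; omega
          simp only [Function.comp, zero_add]
          rw [ih (p - k)]
          have h0 : 0 ≤ p - (k : Int) := by omega
          rw [if_pos h0]
          congr 2
          omega
        rw [hmap]
        rw [if_pos hp]
        have := pv_hockey1 m p.toNat
        have hcast : ((List.range (p.toNat + 1)).map
            (fun k => ((p.toNat - k + m).choose m : Int))).sum
            = ((((List.range (p.toNat + 1)).map
                (fun k => (p.toNat - k + m).choose m)).sum : Nat) : Int) := by
          rw [Nat.cast_list_sum, List.map_map]
          rfl
        rw [hcast, this, show p.toNat + (m + 1) = p.toNat + m + 1 from by omega]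
        omega
      · have hnil : PySem.List.pyRange 0 (p + 1) 1 = [] :=
          PySem.List.pyRange_one_eq_nil (by omega)
        rw [hnil]
        simp [hp]

-- the exact-division product loop of combB computes the binomial coefficient
theorem pv_combB_loop (n k : Nat) (hkn : k ≤ n) : ∀ j : Nat, j ≤ k →
    (PySem.List.pyRange 1 ((j : Int) + 1) 1).foldl
      (fun r t => PySem.Int.floordiv (r * ((n : Int) - (k : Int) + t)) t) 1
      = ((n - k + j).choose j : Int) := by
  intro j
  induction j with
  | zero =>
      intro _
      rw [show ((0 : Nat) : Int) + 1 = 1 by norm_num,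
        PySem.List.pyRange_one_eq_nil (by omega)]
      simp
  | succ j ih =>
      intro hj
      have hj' : j ≤ k := by omega
      have hsplit : PySem.List.pyRange 1 (((j + 1 : Nat) : Int) + 1) 1
          = PySem.List.pyRange 1 ((j : Int) + 1) 1 ++ [((j : Int) + 1)] := by
        have h := PySem.List.pyRange_one_succ_right (a := 1) (b := (j : Int) + 1) (by omega)
        rw [show (((j + 1 : Nat) : Int) + 1) = ((j : Int) + 1) + 1 from by push_cast; ring]
        exact h
      rw [hsplit, List.foldl_append, ih hj']
      simp only [List.foldl_cons, List.foldl_nil]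
      have hfac : (n : Int) - (k : Int) + ((j : Int) + 1) = ((n - k + j + 1 : Nat) : Int) := by
        omega
      rw [hfac]
      have hmul : ((n - k + j).choose j : Int) * ((n - k + j + 1 : Nat) : Int)
          = ((n - k + j + 1).choose (j + 1) : Int) * ((j + 1 : Nat) : Int) := by
        have := Nat.add_one_mul_choose_eq (n - k + j) j
        exact_mod_cast congrArg (fun x : Nat => (x : Int)) (by
          calc (n - k + j).choose j * (n - k + j + 1)
              = (n - k + j + 1) * (n - k + j).choose j := by ring
            _ = (n - k + j + 1).choose (j + 1) * (j + 1) := by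
                simpa [Nat.succ_eq_add_one] using this)
      have hpos : (0 : Int) < (j : Int) + 1 := by omega
      rw [PySem.Int.floordiv_eq_ediv_of_pos hpos,
        show ((j : Int) + 1) = ((j + 1 : Nat) : Int) from by push_cast; ring,
        show n - k + (j + 1) = n - k + j + 1 from by omega,
        hmul, Int.mul_ediv_cancel _ (by exact_mod_cast Nat.succ_ne_zero j)]

-- combB n k = C(n.toNat, k) whenever 0 ≤ k (0 when n < 0)
theorem pv_combB_eq (n k : Int) (hk : 0 ≤ k) :
    combB n k = if 0 ≤ n then ((n.toNat.choose k.toNat : Nat) : Int) else 0 := by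
  rcases Int.eq_ofNat_of_zero_le hk with ⟨K, rfl⟩
  unfold combB
  by_cases hn : 0 ≤ n
  · rcases Int.eq_ofNat_of_zero_le hn with ⟨N, rfl⟩
    rw [if_pos hn]
    simp only [Int.toNat_natCast]
    by_cases hnk : N < K
    · rw [if_pos (Or.inr (by exact_mod_cast hnk)), Nat.choose_eq_zero_of_lt hnk]
      simp
    · rw [if_neg (by omega)]
      rw [pv_combB_loop N K (by omega) K (le_refl _)]
      rw [show N - K + K = N from by omega]
  · rw [if_pos (Or.inl (by omega)), if_neg hn]

-- ===== VERDICT (by name: the statement is the Claim_ definition above) =====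
theorem calc_second_pattern_count_spec : Claim_equal_calc_second_pattern_count := by
  intro fp sp _
  unfold Spec_calc_second_pattern_count calc_second_pattern_count calc_second_pattern_count_alt
  by_cases h : fp > sp
  · rw [if_pos h, if_pos h]
    rw [pv_calcPatternCount_eq 8 sp, pv_combB_eq (sp + 8) 8 (by norm_num)]
    by_cases hsp : 0 ≤ sp
    · rw [if_pos hsp, if_pos (by omega)]
      congr 2
      omega
    · rw [if_neg hsp]
      by_cases hsp8 : 0 ≤ sp + 8
      · rw [if_pos hsp8]
        rw [Nat.choose_eq_zero_of_lt (by omega)]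
        simp
      · rw [if_neg hsp8]
        simp
  · rw [if_neg h, if_neg h]
    simp only []
    have hw : calcPatternCount sp 8
        = combB (sp + 7) 7 := by
      rw [pv_calcPatternCount_eq 7 sp, pv_combB_eq (sp + 7) 7 (by norm_num)]
      by_cases hsp : 0 ≤ sp
      · rw [if_pos hsp, if_pos (by omega)]
        congr 2
        omega
      · rw [if_neg hsp]
        by_cases hsp7 : 0 ≤ sp + 7
        · rw [if_pos hsp7, Nat.choose_eq_zero_of_lt (by omega)]
          simp
        · rw [if_neg hsp7]
          norm_num
    have h9 : ((PySem.List.pyRange 0 fp 1).map (fun i => calcPatternCount i 8)).sum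
        = combB (fp + 7) 8 := by
      rw [pv_combB_eq (fp + 7) 8 (by norm_num)]
      by_cases hfp : 0 < fp
      · rw [PySem.List.pyRange_one, List.map_map]
        have hmap : (List.range ((fp - 0).toNat)).map
            ((fun i => calcPatternCount i 8) ∘ (fun k : Nat => (0 : Int) + k))
            = (List.range fp.toNat).map (fun k => ((k + 7).choose 7 : Int)) := by
          have : (fp - 0).toNat = fp.toNat := by omega
          rw [this]
          apply List.map_congr_left
          intro k _
          simp only [Function.comp, zero_add]
          rw [pv_calcPatternCount_eq 7 (k : Int), if_pos (by omega)]
          norm_num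
        rw [hmap]
        have hcast : ((List.range fp.toNat).map (fun k => ((k + 7).choose 7 : Int))).sum
            = ((((List.range fp.toNat).map (fun k => (k + 7).choose 7)).sum : Nat) : Int) := by
          rw [Nat.cast_list_sum, List.map_map]
          rfl
        rw [hcast, pv_hockey2 7 fp.toNat, if_pos (by omega)]
        congr 2
        omega
      · rw [PySem.List.pyRange_one_eq_nil (by omega), List.map_nil, List.sum_nil]
        by_cases hfp7 : 0 ≤ fp + 7
        · rw [if_pos hfp7, Nat.choose_eq_zero_of_lt (by omega)]
          simp
        · rw [if_neg hfp7]
    rw [hw, h9]
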